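-- pv_equiv track=rewrite | github.com/yangchaungfu/hub-bcvp | 杨创富/week11/homework11.py | create_seq2seq_dataset
-- ===== SOURCE A (Python) =====
-- def create_seq2seq_dataset(num_samples=1000):
--     """构造Seq2Seq格式的数据集（例如：中文→英文翻译）"""
--     # 基础数据
--     base_pairs = [
--         {"zh": "我爱自然语言处理", "en": "I love natural language processing"},
--         {"zh": "深度学习是机器学习的一个分支", "en": "Deep learning is a branch of machine learning"},
--         {"zh": "人工智能正在改变世界", "en": "Artificial intelligence is changing the world"},
--         {"zh": "神经网络由神经元组成", "en": "Neural networks consist of neurons"},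
--         {"zh": "这个模型表现非常好", "en": "This model performs very well"},
--         {"zh": "我们需要更多的训练数据", "en": "We need more training data"},
--         {"zh": "准确率达到了百分之九十五", "en": "The accuracy reached ninety-five percent"},
--         {"zh": "请解释一下这个概念", "en": "Please explain this concept"},
--         {"zh": "如何提高模型性能", "en": "How to improve model performance"},
--         {"zh": "这是一个重要的发现", "en": "This is an important discovery"}
--     ]
--
--     # 扩展数据
--     data = []
--     for i in range(num_samples):
--         pair = base_pairs[i % len(base_pairs)]
--         # 添加一些变化
--         variations = [
--             (f"翻译：{pair['zh']}", f"Translate: {pair['en']}"),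
--             (f"请翻译：{pair['zh']}", f"Please translate: {pair['en']}"),
--             (f"将以下中文翻译成英文：{pair['zh']}", f"Translate Chinese to English: {pair['en']}"),
--             (pair['zh'], pair['en']),  # 直接对
--             (f"{pair['zh']}（翻译）", pair['en'])
--         ]
--
--         input_text, target_text = variations[i % len(variations)]
--         data.append({
--             "input_text": input_text,
--             "target_text": target_text
--         })
--
--     return data
-- ===== SOURCE B (Python) =====
-- def create_seq2seq_dataset(num_samples=1000):
--     """构造Seq2Seq格式的数据集（例如：中文→英文翻译）"""
--     base_pairs = [
--         {"zh": "我爱自然语言处理", "en": "I love natural language processing"},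
--         {"zh": "深度学习是机器学习的一个分支", "en": "Deep learning is a branch of machine learning"},
--         {"zh": "人工智能正在改变世界", "en": "Artificial intelligence is changing the world"},
--         {"zh": "神经网络由神经元组成", "en": "Neural networks consist of neurons"},
--         {"zh": "这个模型表现非常好", "en": "This model performs very well"},
--         {"zh": "我们需要更多的训练数据", "en": "We need more training data"},
--         {"zh": "准确率达到了百分之九十五", "en": "The accuracy reached ninety-five percent"},
--         {"zh": "请解释一下这个概念", "en": "Please explain this concept"},
--         {"zh": "如何提高模型性能", "en": "How to improve model performance"},
--         {"zh": "这是一个重要的发现", "en": "This is an important discovery"}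
--     ]
--     # The sample at index i depends only on i % 10 (pair index i % 10, variation
--     # index i % 5 = (i % 10) % 5), so build the 10 distinct (input, target) pairs once.
--     table = []
--     for r in range(10):
--         zh, en = base_pairs[r]["zh"], base_pairs[r]["en"]
--         v = r % 5
--         if v == 0:
--             t = (f"翻译：{zh}", f"Translate: {en}")
--         elif v == 1:
--             t = (f"请翻译：{zh}", f"Please translate: {en}")
--         elif v == 2:
--             t = (f"将以下中文翻译成英文：{zh}", f"Translate Chinese to English: {en}")
--         elif v == 3:
--             t = (zh, en)
--         else:
--             t = (f"{zh}（翻译）", en)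
--         table.append(t)
--     # fresh dict per sample (A also creates a new dict each iteration)
--     return [{"input_text": table[i % 10][0], "target_text": table[i % 10][1]}
--             for i in range(num_samples)]
-- ===== Notes on version B (the rewrite author's own statement) =====
-- stated objective: faster
-- what changed: B precomputes once the 10 distinct (input_text, target_text) pairs (sample i depends only on i % 10, since i % 5 = (i % 10) % 5) and then builds the dataset by indexing this table, instead of A's rebuilding all 5 f-string variations on every iteration.
import Mathlib
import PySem

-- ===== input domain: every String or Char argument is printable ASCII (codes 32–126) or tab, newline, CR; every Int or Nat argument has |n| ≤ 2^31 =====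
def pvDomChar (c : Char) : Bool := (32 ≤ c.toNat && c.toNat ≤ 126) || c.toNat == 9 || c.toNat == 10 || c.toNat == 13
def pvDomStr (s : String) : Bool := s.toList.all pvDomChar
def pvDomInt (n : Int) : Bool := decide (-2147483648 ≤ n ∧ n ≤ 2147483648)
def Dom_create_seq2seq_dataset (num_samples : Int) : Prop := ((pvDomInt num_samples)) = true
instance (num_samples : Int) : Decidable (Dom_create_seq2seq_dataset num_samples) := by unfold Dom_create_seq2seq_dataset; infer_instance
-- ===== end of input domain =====

-- B precomputes the 10 distinct (input, target) pairs once and indexes this table per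
-- sample instead of rebuilding all 5 variations each iteration (constant-factor faster).

-- ===== PORT A =====
-- shared constant of both Pythons: the literal base_pairs list of dicts
def pvBasePairs : List (PySem.Dict String String) :=
  [ PySem.Dict.mk [("zh", "我爱自然语言处理"), ("en", "I love natural language processing")],
    PySem.Dict.mk [("zh", "深度学习是机器学习的一个分支"), ("en", "Deep learning is a branch of machine learning")],
    PySem.Dict.mk [("zh", "人工智能正在改变世界"), ("en", "Artificial intelligence is changing the world")],
    PySem.Dict.mk [("zh", "神经网络由神经元组成"), ("en", "Neural networks consist of neurons")],
    PySem.Dict.mk [("zh", "这个模型表现非常好"), ("en", "This model performs very well")],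
    PySem.Dict.mk [("zh", "我们需要更多的训练数据"), ("en", "We need more training data")],
    PySem.Dict.mk [("zh", "准确率达到了百分之九十五"), ("en", "The accuracy reached ninety-five percent")],
    PySem.Dict.mk [("zh", "请解释一下这个概念"), ("en", "Please explain this concept")],
    PySem.Dict.mk [("zh", "如何提高模型性能"), ("en", "How to improve model performance")],
    PySem.Dict.mk [("zh", "这是一个重要的发现"), ("en", "This is an important discovery")] ]

-- one iteration of A's loop body (indexing always in range since 0 ≤ i; getD defaults unreachable)
def pvRowA (i : Int) : List (String × String) :=
  let pair := (PySem.List.pyGet? pvBasePairs (PySem.Int.mod i 10)).getD PySem.Dict.empty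
  let zh := (PySem.Dict.get? pair "zh").getD ""
  let en := (PySem.Dict.get? pair "en").getD ""
  let variations : List (String × String) :=
    [ ("翻译：" ++ zh, "Translate: " ++ en),
      ("请翻译：" ++ zh, "Please translate: " ++ en),
      ("将以下中文翻译成英文：" ++ zh, "Translate Chinese to English: " ++ en),
      (zh, en),
      (zh ++ "（翻译）", en) ]
  let t := (PySem.List.pyGet? variations (PySem.Int.mod i 5)).getD ("", "")
  [("input_text", t.1), ("target_text", t.2)]

def create_seq2seq_dataset (num_samples : Int) : List (List (String × String)) :=
  (PySem.List.pyRange 0 num_samples 1).foldl (fun data i => data ++ [pvRowA i]) []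

-- ===== PORT B =====
def pvTableEntry (r : Int) : String × String :=
  let pair := (PySem.List.pyGet? pvBasePairs r).getD PySem.Dict.empty
  let zh := (PySem.Dict.get? pair "zh").getD ""
  let en := (PySem.Dict.get? pair "en").getD ""
  let v := PySem.Int.mod r 5
  if v = 0 then ("翻译：" ++ zh, "Translate: " ++ en)
  else if v = 1 then ("请翻译：" ++ zh, "Please translate: " ++ en)
  else if v = 2 then ("将以下中文翻译成英文：" ++ zh, "Translate Chinese to English: " ++ en)
  else if v = 3 then (zh, en)
  else (zh ++ "（翻译）", en)

def pvTable : List (String × String) :=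
  (PySem.List.pyRange 0 10 1).foldl (fun t r => t ++ [pvTableEntry r]) []

def create_seq2seq_dataset_alt (num_samples : Int) : List (List (String × String)) :=
  (PySem.List.pyRange 0 num_samples 1).map (fun i =>
    let t := (PySem.List.pyGet? pvTable (PySem.Int.mod i 10)).getD ("", "")
    [("input_text", t.1), ("target_text", t.2)])

-- ===== PRECONDITION & SPEC =====
def Spec_create_seq2seq_dataset (num_samples : Int) (out : List (List (String × String))) : Prop := out = create_seq2seq_dataset_alt num_samples
instance (num_samples : Int) (out : List (List (String × String))) : Decidable (Spec_create_seq2seq_dataset num_samples out) := by unfold Spec_create_seq2seq_dataset; infer_instance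

-- ===== CLAIM (what is proved, stated in full; the proofs are below) =====
def Claim_equal_create_seq2seq_dataset : Prop := ∀ (num_samples : Int), Dom_create_seq2seq_dataset num_samples → Spec_create_seq2seq_dataset num_samples (create_seq2seq_dataset num_samples)

-- ===== LEMMAS AND PROOFS =====

-- proof-only helpers: A's loop body / B's map body as functions of the residue r = i % 10
def pvRowOf (r : Int) : List (String × String) :=
  let pair := (PySem.List.pyGet? pvBasePairs r).getD PySem.Dict.empty
  let zh := (PySem.Dict.get? pair "zh").getD ""
  let en := (PySem.Dict.get? pair "en").getD ""
  let variations : List (String × String) :=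
    [ ("翻译：" ++ zh, "Translate: " ++ en),
      ("请翻译：" ++ zh, "Please translate: " ++ en),
      ("将以下中文翻译成英文：" ++ zh, "Translate Chinese to English: " ++ en),
      (zh, en),
      (zh ++ "（翻译）", en) ]
  let t := (PySem.List.pyGet? variations (PySem.Int.mod r 5)).getD ("", "")
  [("input_text", t.1), ("target_text", t.2)]

def pvRowB (r : Int) : List (String × String) :=
  let t := (PySem.List.pyGet? pvTable r).getD ("", "")
  [("input_text", t.1), ("target_text", t.2)]

-- the two bodies agree on every residue 0..9 (10 closed string computations)
set_option maxHeartbeats 2000000 in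
theorem pvRow_eq : ∀ r ∈ PySem.List.pyRange 0 10 1, pvRowOf r = pvRowB r := by decide

-- A's body is pvRowOf at the residue: i % 5 = (i % 10) % 5 since 5 ∣ 10
theorem pvRowA_as_rowOf (i : Int) : pvRowA i = pvRowOf (PySem.Int.mod i 10) := by
  have h5 : PySem.Int.mod i 5 = PySem.Int.mod (PySem.Int.mod i 10) 5 := by
    rw [PySem.Int.mod_eq_emod_of_pos (by norm_num : (0:Int) < 5),
        PySem.Int.mod_eq_emod_of_pos (by norm_num : (0:Int) < 10),
        PySem.Int.mod_eq_emod_of_pos (by norm_num : (0:Int) < 5),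
        Int.emod_emod_of_dvd i (by norm_num : (5:Int) ∣ 10)]
  unfold pvRowA pvRowOf
  rw [h5]

-- ===== VERDICT (by name: the statement is the Claim_ definition above) =====
theorem create_seq2seq_dataset_spec : Claim_equal_create_seq2seq_dataset := by
  intro n _
  unfold Spec_create_seq2seq_dataset create_seq2seq_dataset create_seq2seq_dataset_alt
  rw [PySem.List.foldl_append_singleton_eq_map, List.nil_append]
  refine List.map_congr_left fun i hi => ?_
  have h0 : 0 ≤ i := (PySem.List.mem_pyRange_one.mp hi).1
  have hmem : PySem.Int.mod i 10 ∈ PySem.List.pyRange 0 10 1 :=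
    PySem.List.mem_pyRange_one.mpr
      ⟨PySem.Int.mod_nonneg i (by norm_num : (0:Int) < 10),
       PySem.Int.mod_lt i (by norm_num : (0:Int) < 10)⟩
  calc pvRowA i = pvRowOf (PySem.Int.mod i 10) := pvRowA_as_rowOf i
    _ = pvRowB (PySem.Int.mod i 10) := pvRow_eq _ hmem
    _ = _ := rfl
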